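-- pv_equiv track=rewrite | github.com/yoon-asha/JSBeginner | week12/ex1_taeho.py | solution
-- ===== SOURCE A (Python) =====
-- def count_dist(char):
--     chars = list("ABCDEFGHIJKLMNOPQRSTUVWXYZ")
--     idx = chars.index(char)
--     return min(idx, 26-idx)
--
-- def solution(name):
--
--     count_v = sum([count_dist(char) for char in name])
--     count_h = len(name)-1
--
--     left,right = 1,1
--     while left<len(name):
--         while(left<len(name) and name[left]!="A"):
--             left += 1
--         right = left
--         while(right<len(name) and name[right]=="A"):
--             right+=1
--         if left < len(name) and right<=len(name):
--             move_left = left-1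
--             move_right = len(name)-right
--             count_h = min(count_h,2*move_left+move_right,move_left+2*move_right)
--         left = right
--
--     return count_v + count_h
-- ===== SOURCE B (Python) =====
-- def count_dist(char):
--     chars = list("ABCDEFGHIJKLMNOPQRSTUVWXYZ")
--     idx = chars.index(char)
--     return min(idx, 26-idx)
--
-- def solution(name):
--     count_v = sum(count_dist(char) for char in name)
--     n = len(name)
--     answer = n - 1
--     for i in range(n):
--         next_idx = i + 1
--         while next_idx < n and name[next_idx] == 'A':
--             next_idx += 1
--         answer = min(answer, 2*i + (n - next_idx), i + 2*(n - next_idx))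
--     return count_v + answer
-- ===== Notes on version B (the rewrite author's own statement) =====
-- stated objective: simpler
-- what changed: Replaced the block-to-block jumping outer while-loop for the horizontal cost (which scans for the next A-run with a nested find loop and tracks left/right pointers) by a single for-loop over every index i that skips the run of 'A's after i and updates a running minimum; count_dist is kept verbatim.
import Mathlib
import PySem

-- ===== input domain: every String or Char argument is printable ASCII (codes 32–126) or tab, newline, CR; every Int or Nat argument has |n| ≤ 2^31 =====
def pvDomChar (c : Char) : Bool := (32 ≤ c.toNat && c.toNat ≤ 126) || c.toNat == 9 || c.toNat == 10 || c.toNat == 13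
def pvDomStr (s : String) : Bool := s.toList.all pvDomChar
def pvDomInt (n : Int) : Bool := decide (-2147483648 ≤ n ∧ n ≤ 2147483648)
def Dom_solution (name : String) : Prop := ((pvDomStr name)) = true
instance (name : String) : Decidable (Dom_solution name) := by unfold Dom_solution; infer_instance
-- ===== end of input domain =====

-- B replaces A's block-to-block jumping outer while-loop for the horizontal cost by a
-- single loop over every index that skips the A-run after it (simpler decomposition,
-- same value). The while loops are ported with fuel = the loop measure (a totality
-- guard only, the computation is the Python's).

-- ===== PORT A =====

-- count_dist: chars.index(char) raises ValueError off A–Z; Pre_ excludes that, so the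
-- `none` branch value 0 is never reached under Pre_.
def countDist (c : Char) : Int :=
  match PySem.List.index? ("ABCDEFGHIJKLMNOPQRSTUVWXYZ".toList) c with
  | some i => min (i : Int) (26 - (i : Int))
  | none => 0

-- inner while `while right < len and name[right] == 'A': right += 1`
def skipAGo (s : List Char) : Nat → Nat → Nat
  | 0, i => i
  | fuel + 1, i =>
    if h : i < s.length then
      (if s[i] = 'A' then skipAGo s fuel (i + 1) else i)
    else i

def skipA (s : List Char) (i : Nat) : Nat := skipAGo s (s.length - i) i

-- inner while `while left < len and name[left] != 'A': left += 1`
def findAGo (s : List Char) : Nat → Nat → Nat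
  | 0, i => i
  | fuel + 1, i =>
    if h : i < s.length then
      (if s[i] ≠ 'A' then findAGo s fuel (i + 1) else i)
    else i

def findA (s : List Char) (i : Nat) : Nat := findAGo s (s.length - i) i

-- outer while loop of A over (left, count_h); `findA s left` is Python's local `left`
-- after the first inner while, `skipA s (findA s left)` is `right`
def loopAGo (s : List Char) : Nat → Nat → Int → Int
  | 0, _, ch => ch
  | fuel + 1, left, ch =>
    if left < s.length then
      loopAGo s fuel (skipA s (findA s left))
        (if findA s left < s.length ∧ skipA s (findA s left) ≤ s.length then
          min (min ch (2 * ((findA s left : Int) - 1) + ((s.length : Int) - (skipA s (findA s left) : Int))))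
              (((findA s left : Int) - 1) + 2 * ((s.length : Int) - (skipA s (findA s left) : Int)))
        else ch)
    else ch

def loopA (s : List Char) (left : Nat) (ch : Int) : Int := loopAGo s (s.length - left) left ch

def solution (name : String) : Int :=
  (name.toList.map countDist).sum + loopA name.toList 1 ((name.toList.length : Int) - 1)

-- ===== PORT B =====

-- for-loop of B over i in range(n); the inner while is the same scan-past-'A' loop as
-- A's second inner while (skipA), started at i+1
def loopBGo (s : List Char) : Nat → Nat → Int → Int
  | 0, _, ans => ans
  | fuel + 1, i, ans =>
    if i < s.length then
      loopBGo s fuel (i + 1)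
        (min (min ans (2 * (i : Int) + ((s.length : Int) - (skipA s (i + 1) : Int))))
             ((i : Int) + 2 * ((s.length : Int) - (skipA s (i + 1) : Int))))
    else ans

def loopB (s : List Char) (i : Nat) (ans : Int) : Int := loopBGo s (s.length - i) i ans

def solution_alt (name : String) : Int :=
  (name.toList.map countDist).sum + loopB name.toList 0 ((name.toList.length : Int) - 1)

-- ===== PRECONDITION & SPEC =====
-- A (and B alike) raises ValueError via chars.index on any character outside 'A'..'Z';
-- Pre_ admits exactly the strings on which the Python A returns.
def Pre_solution (name : String) : Prop :=
  (name.toList.all (fun c => decide ('A' ≤ c) && decide (c ≤ 'Z'))) = true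
instance (name : String) : Decidable (Pre_solution name) := by unfold Pre_solution; infer_instance

def pvWitness_solution : String := "JAZ"

def Spec_solution (name : String) (out : Int) : Prop := out = solution_alt name
instance (name : String) (out : Int) : Decidable (Spec_solution name out) := by unfold Spec_solution; infer_instance

-- ===== CLAIM (what is proved, stated in full; the proofs are below) =====
def Claim_equal_solution : Prop := ∀ (name : String), Dom_solution name → Pre_solution name → Spec_solution name (solution name)

-- ===== LEMMAS AND PROOFS =====

-- candidate value B considers at index k (= what A considers when k+1 starts an A-run)
def cand (s : List Char) (k : Nat) : Int :=
  min (2 * (k : Int) + ((s.length : Int) - (skipA s (k + 1) : Int)))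
      ((k : Int) + 2 * ((s.length : Int) - (skipA s (k + 1) : Int)))

-- ---- unfold lemmas: the wrappers satisfy the loops' defining equations ----

theorem skipA_unfold (s : List Char) (i : Nat) :
    skipA s i = if h : i < s.length then (if s[i] = 'A' then skipA s (i + 1) else i) else i := by
  unfold skipA
  by_cases h : i < s.length
  · rw [show s.length - i = (s.length - (i + 1)) + 1 by omega]
    simp only [skipAGo]
  · rw [show s.length - i = 0 by omega]
    simp only [skipAGo]
    rw [dif_neg h]

theorem findA_unfold (s : List Char) (i : Nat) :
    findA s i = if h : i < s.length then (if s[i] ≠ 'A' then findA s (i + 1) else i) else i := by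
  unfold findA
  by_cases h : i < s.length
  · rw [show s.length - i = (s.length - (i + 1)) + 1 by omega]
    simp only [findAGo]
  · rw [show s.length - i = 0 by omega]
    simp only [findAGo]
    rw [dif_neg h]

theorem loopBGo_stop (s : List Char) (fuel i : Nat) (ans : Int) (h : ¬ i < s.length) :
    loopBGo s fuel i ans = ans := by
  cases fuel with
  | zero => rfl
  | succ fuel => simp only [loopBGo]; rw [if_neg h]

theorem loopB_unfold (s : List Char) (i : Nat) (ans : Int) :
    loopB s i ans =
      if i < s.length then
        loopB s (i + 1)
          (min (min ans (2 * (i : Int) + ((s.length : Int) - (skipA s (i + 1) : Int))))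
               ((i : Int) + 2 * ((s.length : Int) - (skipA s (i + 1) : Int))))
      else ans := by
  unfold loopB
  by_cases h : i < s.length
  · rw [show s.length - i = (s.length - (i + 1)) + 1 by omega]
    simp only [loopBGo]
  · rw [if_neg h, loopBGo_stop s _ i ans h]

-- ---- basic scan facts ----

theorem skipA_ge (s : List Char) (i : Nat) : i ≤ skipA s i := by
  suffices H : ∀ m i, s.length - i ≤ m → i ≤ skipA s i from H (s.length - i) i le_rfl
  intro m
  induction m with
  | zero =>
    intro i h
    rw [skipA_unfold, dif_neg (by omega)]
  | succ m ih =>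
    intro i h
    rw [skipA_unfold]
    by_cases hlt : i < s.length
    · rw [dif_pos hlt]
      by_cases hA : s[i] = 'A'
      · rw [if_pos hA]; have := ih (i + 1) (by omega); omega
      · rw [if_neg hA]
    · rw [dif_neg hlt]

theorem findA_ge (s : List Char) (i : Nat) : i ≤ findA s i := by
  suffices H : ∀ m i, s.length - i ≤ m → i ≤ findA s i from H (s.length - i) i le_rfl
  intro m
  induction m with
  | zero =>
    intro i h
    rw [findA_unfold, dif_neg (by omega)]
  | succ m ih =>
    intro i h
    rw [findA_unfold]
    by_cases hlt : i < s.length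
    · rw [dif_pos hlt]
      by_cases hA : s[i] ≠ 'A'
      · rw [if_pos hA]; have := ih (i + 1) (by omega); omega
      · rw [if_neg hA]
    · rw [dif_neg hlt]

theorem findA_isA (s : List Char) (i : Nat) (h : findA s i < s.length) :
    s[findA s i]? = some 'A' := by
  suffices H : ∀ m i, s.length - i ≤ m → findA s i < s.length → s[findA s i]? = some 'A' from
    H (s.length - i) i le_rfl h
  intro m
  induction m with
  | zero =>
    intro i hm hlen
    rw [findA_unfold, dif_neg (by omega)] at hlen ⊢
    omega
  | succ m ih =>
    intro i hm hlen
    rw [findA_unfold] at hlen ⊢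
    by_cases hlt : i < s.length
    · rw [dif_pos hlt] at hlen ⊢
      by_cases hA : s[i] ≠ 'A'
      · rw [if_pos hA] at hlen ⊢; exact ih (i + 1) (by omega) hlen
      · rw [if_neg hA] at hlen ⊢
        have hA' : s[i] = 'A' := not_not.mp hA
        rw [List.getElem?_eq_getElem hlt, hA']
    · rw [dif_neg hlt] at hlen; omega

theorem lt_skipA_findA (s : List Char) (left : Nat) (h : left < s.length) :
    left < skipA s (findA s left) := by
  have hge := findA_ge s left
  by_cases hl : findA s left < s.length
  · have hA := findA_isA s left hl
    rw [List.getElem?_eq_getElem hl] at hA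
    have heq : skipA s (findA s left) = skipA s (findA s left + 1) := by
      rw [skipA_unfold, dif_pos hl, if_pos (by simpa using hA)]
    have := skipA_ge s (findA s left + 1)
    omega
  · have : skipA s (findA s left) = findA s left := by
      rw [skipA_unfold, dif_neg hl]
    omega

theorem skipA_le_len (s : List Char) (i : Nat) (h : i ≤ s.length) : skipA s i ≤ s.length := by
  suffices H : ∀ m i, s.length - i ≤ m → i ≤ s.length → skipA s i ≤ s.length from
    H (s.length - i) i le_rfl h
  intro m
  induction m with
  | zero =>
    intro i hm hi
    rw [skipA_unfold, dif_neg (by omega)]; exact hi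
  | succ m ih =>
    intro i hm hi
    rw [skipA_unfold]
    by_cases hlt : i < s.length
    · rw [dif_pos hlt]
      by_cases hA : s[i] = 'A'
      · rw [if_pos hA]; exact ih (i + 1) (by omega) (by omega)
      · rw [if_neg hA]; exact hi
    · rw [dif_neg hlt]; exact hi

theorem skipA_stable (s : List Char) (i j : Nat) (h1 : i ≤ j) (h2 : j ≤ skipA s i) :
    skipA s j = skipA s i := by
  suffices H : ∀ m i j, s.length - i ≤ m → i ≤ j → j ≤ skipA s i → skipA s j = skipA s i from
    H (s.length - i) i j le_rfl h1 h2
  intro m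
  induction m with
  | zero =>
    intro i j hm h1 h2
    rw [skipA_unfold, dif_neg (by omega)] at h2 ⊢
    have : j = i := by omega
    rw [this, skipA_unfold, dif_neg (by omega)]
  | succ m ih =>
    intro i j hm h1 h2
    by_cases hlt : i < s.length
    · by_cases hA : s[i] = 'A'
      · have hstep : skipA s i = skipA s (i + 1) := by
          rw [skipA_unfold s i, dif_pos hlt, if_pos hA]
        rcases Nat.eq_or_lt_of_le h1 with he | hgt
        · rw [← he]
        · rw [hstep] at h2 ⊢
          exact ih (i + 1) j (by omega) (by omega) h2
      · have hstop : skipA s i = i := by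
          rw [skipA_unfold s i, dif_pos hlt, if_neg hA]
        rw [hstop] at h2
        have : j = i := by omega
        rw [this]
    · have hstop : skipA s i = i := by rw [skipA_unfold s i, dif_neg hlt]
      rw [hstop] at h2
      have : j = i := by omega
      rw [this]

theorem findA_min (s : List Char) (i k : Nat) (h1 : i ≤ k) (hk : k < s.length)
    (hA : s[k]? = some 'A') : findA s i ≤ k := by
  suffices H : ∀ m i, s.length - i ≤ m → i ≤ k → findA s i ≤ k from
    H (s.length - i) i le_rfl h1
  intro m
  induction m with
  | zero =>
    intro i hm hik
    rw [findA_unfold, dif_neg (by omega)]; exact hik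
  | succ m ih =>
    intro i hm hik
    rw [findA_unfold]
    by_cases hlt : i < s.length
    · rw [dif_pos hlt]
      by_cases hne : s[i] ≠ 'A'
      · rw [if_pos hne]
        rcases Nat.eq_or_lt_of_le hik with he | hgt
        · subst he
          rw [List.getElem?_eq_getElem hlt] at hA
          exact absurd (Option.some.inj hA) hne
        · exact ih (i + 1) (by omega) (by omega)
      · rw [if_neg hne]; exact hik
    · rw [dif_neg hlt]; exact hik

-- ---- loop A: its result is ≤ its initial value and ≤ every B-candidate ----

theorem loopA_unfold (s : List Char) (left : Nat) (ch : Int) :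
    loopA s left ch =
      if left < s.length then
        loopA s (skipA s (findA s left))
          (if findA s left < s.length ∧ skipA s (findA s left) ≤ s.length then
            min (min ch (2 * ((findA s left : Int) - 1) + ((s.length : Int) - (skipA s (findA s left) : Int))))
                (((findA s left : Int) - 1) + 2 * ((s.length : Int) - (skipA s (findA s left) : Int)))
          else ch)
      else ch := by
  have stop : ∀ fuel left (ch : Int), ¬ left < s.length → loopAGo s fuel left ch = ch := by
    intro fuel left ch h
    cases fuel with
    | zero => rfl
    | succ fuel => simp only [loopAGo]; rw [if_neg h]
  have irrel : ∀ m fuel fuel' left (ch : Int), s.length - left ≤ m →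
      s.length - left ≤ fuel → s.length - left ≤ fuel' →
      loopAGo s fuel left ch = loopAGo s fuel' left ch := by
    intro m
    induction m with
    | zero =>
      intro fuel fuel' left ch hm hf hf'
      rw [stop fuel left ch (by omega), stop fuel' left ch (by omega)]
    | succ m ih =>
      intro fuel fuel' left ch hm hf hf'
      by_cases hlt : left < s.length
      · have hr := lt_skipA_findA s left hlt
        cases fuel with
        | zero => omega
        | succ fuel =>
          cases fuel' with
          | zero => omega
          | succ fuel' =>
            simp only [loopAGo]
            rw [if_pos hlt, if_pos hlt]
            exact ih fuel fuel' _ _ (by omega) (by omega) (by omega)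
      · rw [stop _ _ _ hlt, stop _ _ _ hlt]
  unfold loopA
  by_cases h : left < s.length
  · rw [if_pos h, show s.length - left = (s.length - left - 1) + 1 by omega]
    simp only [loopAGo]
    rw [if_pos h]
    have hr := lt_skipA_findA s left h
    exact irrel _ _ _ _ _ le_rfl (by omega) le_rfl
  · rw [if_neg h, show s.length - left = 0 by omega]
    rfl

theorem loopA_le (s : List Char) (left : Nat) (ch : Int) : loopA s left ch ≤ ch := by
  suffices H : ∀ m left (ch : Int), s.length - left ≤ m → loopA s left ch ≤ ch from
    H (s.length - left) left ch le_rfl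
  intro m
  induction m with
  | zero =>
    intro left ch hm
    rw [loopA_unfold, if_neg (by omega)]
  | succ m ih =>
    intro left ch hm
    rw [loopA_unfold]
    by_cases hlt : left < s.length
    · rw [if_pos hlt]
      have hr := lt_skipA_findA s left hlt
      refine le_trans (ih _ _ (by omega)) ?_
      split
      · exact le_trans (min_le_left _ _) (min_le_left _ _)
      · exact le_rfl
    · rw [if_neg hlt]

theorem loopA_le_cand (s : List Char) (k : Nat) (hkn : k + 1 < s.length)
    (hA : s[k + 1]? = some 'A') (left : Nat) (ch : Int)
    (hl1 : 1 ≤ left) (hlk : left ≤ k + 1) : loopA s left ch ≤ cand s k := by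
  suffices H : ∀ m left (ch : Int), s.length - left ≤ m → 1 ≤ left → left ≤ k + 1 →
      loopA s left ch ≤ cand s k from H (s.length - left) left ch le_rfl hl1 hlk
  intro m
  induction m with
  | zero => intro left ch hm hl1 hlk; omega
  | succ m ih =>
    intro left ch hm hl1 hlk
    have h : left < s.length := by omega
    rw [loopA_unfold, if_pos h]
    have hlf1 := findA_ge s left
    have hlk2 : findA s left ≤ k + 1 := findA_min s left (k + 1) hlk hkn hA
    have hln : findA s left < s.length := by omega
    have hrn : skipA s (findA s left) ≤ s.length := skipA_le_len s _ (by omega)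
    have hlr := lt_skipA_findA s left h
    by_cases hkr : k + 1 < skipA s (findA s left)
    · -- the A-run containing k+1 starts at `findA s left`: skipA (k+1) lands on the same
      -- right end, and A's candidate dominates cand k since findA s left - 1 ≤ k
      have hstep : skipA s (k + 1) = skipA s (findA s left) :=
        skipA_stable s (findA s left) (k + 1) hlk2 (by omega)
      refine le_trans (loopA_le s _ _) ?_
      rw [if_pos (⟨hln, hrn⟩ : findA s left < s.length ∧ skipA s (findA s left) ≤ s.length)]
      unfold cand
      rw [hstep]
      have h1 : 2 * ((findA s left : Int) - 1) + ((s.length : Int) - (skipA s (findA s left) : Int))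
          ≤ 2 * (k : Int) + ((s.length : Int) - (skipA s (findA s left) : Int)) := by omega
      have h2 : ((findA s left : Int) - 1) + 2 * ((s.length : Int) - (skipA s (findA s left) : Int))
          ≤ (k : Int) + 2 * ((s.length : Int) - (skipA s (findA s left) : Int)) := by omega
      exact le_min (le_trans (le_trans (min_le_left _ _) (min_le_right _ _)) h1)
        (le_trans (min_le_right _ _) h2)
    · -- k+1 lies at or beyond `right`: handled by a later iteration
      exact ih _ _ (by omega) (by omega) (by omega)

theorem loopA_ge (s : List Char) (X : Int) (hc : ∀ k, k < s.length → X ≤ cand s k)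
    (left : Nat) (ch : Int) (hch : X ≤ ch) (hl : 1 ≤ left) : X ≤ loopA s left ch := by
  suffices H : ∀ m left (ch : Int), s.length - left ≤ m → X ≤ ch → 1 ≤ left →
      X ≤ loopA s left ch from H (s.length - left) left ch le_rfl hch hl
  intro m
  induction m with
  | zero =>
    intro left ch hm hch hl
    rw [loopA_unfold, if_neg (by omega)]; exact hch
  | succ m ih =>
    intro left ch hm hch hl
    rw [loopA_unfold]
    by_cases hlt : left < s.length
    · rw [if_pos hlt]
      have hlf := findA_ge s left
      have hr1 := lt_skipA_findA s left hlt
      apply ih _ _ (by omega) ?_ (by omega)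
      split
      · rename_i hcond
        have hln : findA s left < s.length := hcond.1
        have hl1 : 1 ≤ findA s left := by omega
        -- A's candidate at this run is exactly cand (findA s left - 1)
        have hX := hc (findA s left - 1) (by omega)
        unfold cand at hX
        rw [show findA s left - 1 + 1 = findA s left by omega] at hX
        rw [show ((findA s left - 1 : Nat) : Int) = (findA s left : Int) - 1 by omega] at hX
        exact le_min (le_min hch (le_trans hX (min_le_left _ _)))
          (le_trans hX (min_le_right _ _))
      · exact hch
    · rw [if_neg hlt]; exact hch

-- ---- loop B: its result is the min of its initial value and all candidates ----

theorem loopB_le (s : List Char) (i : Nat) (ans : Int) : loopB s i ans ≤ ans := by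
  suffices H : ∀ m i (ans : Int), s.length - i ≤ m → loopB s i ans ≤ ans from
    H (s.length - i) i ans le_rfl
  intro m
  induction m with
  | zero =>
    intro i ans hm
    rw [loopB_unfold, if_neg (by omega)]
  | succ m ih =>
    intro i ans hm
    rw [loopB_unfold]
    by_cases hlt : i < s.length
    · rw [if_pos hlt]
      exact le_trans (ih _ _ (by omega)) (le_trans (min_le_left _ _) (min_le_left _ _))
    · rw [if_neg hlt]

theorem loopB_le_cand (s : List Char) (k : Nat) (hkn : k < s.length) (i : Nat) (ans : Int)
    (hik : i ≤ k) : loopB s i ans ≤ cand s k := by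
  suffices H : ∀ m i (ans : Int), s.length - i ≤ m → i ≤ k → loopB s i ans ≤ cand s k from
    H (s.length - i) i ans le_rfl hik
  intro m
  induction m with
  | zero => intro i ans hm hik; omega
  | succ m ih =>
    intro i ans hm hik
    have hlt : i < s.length := by omega
    rw [loopB_unfold, if_pos hlt]
    rcases Nat.eq_or_lt_of_le hik with he | hgt
    · subst he
      refine le_trans (loopB_le s (i + 1) _) ?_
      unfold cand
      exact min_le_min (min_le_right _ _) le_rfl
    · exact ih _ _ (by omega) (by omega)

theorem loopB_ge (s : List Char) (X : Int) (i : Nat) (ans : Int) (hans : X ≤ ans)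
    (hc : ∀ k, i ≤ k → k < s.length → X ≤ cand s k) : X ≤ loopB s i ans := by
  suffices H : ∀ m i (ans : Int), s.length - i ≤ m → X ≤ ans →
      (∀ k, i ≤ k → k < s.length → X ≤ cand s k) → X ≤ loopB s i ans from
    H (s.length - i) i ans le_rfl hans hc
  intro m
  induction m with
  | zero =>
    intro i ans hm hans hc
    rw [loopB_unfold, if_neg (by omega)]; exact hans
  | succ m ih =>
    intro i ans hm hans hc
    rw [loopB_unfold]
    by_cases hlt : i < s.length
    · rw [if_pos hlt]
      apply ih _ _ (by omega)
      · have hX := hc i le_rfl hlt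
        unfold cand at hX
        exact le_min (le_min hans (le_trans hX (min_le_left _ _)))
          (le_trans hX (min_le_right _ _))
      · intro k hk hkn; exact hc k (by omega) hkn
    · rw [if_neg hlt]; exact hans

-- cand k is at least len-1 when no 'A' follows directly after position k
theorem cand_ge_of_notA (s : List Char) (k : Nat) (hkn : k < s.length)
    (hno : ¬ s[k + 1]? = some 'A') : (s.length : Int) - 1 ≤ cand s k := by
  have hskip : skipA s (k + 1) = k + 1 := by
    rw [skipA_unfold]
    by_cases h1 : k + 1 < s.length
    · rw [dif_pos h1]
      have : ¬ s[k + 1]'h1 = 'A' := by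
        intro hA
        exact hno (by rw [List.getElem?_eq_getElem h1, hA])
      rw [if_neg this]
    · rw [dif_neg h1]
  unfold cand
  rw [hskip]
  have : (k : Int) + 1 ≤ (s.length : Int) := by exact_mod_cast hkn
  simp only [le_min_iff]
  omega

theorem loop_eq (s : List Char) :
    loopA s 1 ((s.length : Int) - 1) = loopB s 0 ((s.length : Int) - 1) := by
  apply le_antisymm
  · -- A ≤ B : B is a min of n-1 and the cands; A is ≤ each of them
    apply loopB_ge
    · exact loopA_le s 1 _
    · intro k _ hkn
      by_cases hA : s[k + 1]? = some 'A'
      · by_cases hk1 : k + 1 < s.length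
        · exact loopA_le_cand s k hk1 hA 1 _ le_rfl (by omega)
        · rw [List.getElem?_eq_none (by omega)] at hA
          exact absurd hA (by simp)
      · exact le_trans (loopA_le s 1 _) (cand_ge_of_notA s k hkn hA)
  · -- B ≤ A : A's initial value and every candidate it takes are ≥ B's result
    apply loopA_ge
    · intro k hkn
      exact loopB_le_cand s k hkn 0 _ (Nat.zero_le k)
    · exact loopB_le s 0 _
    · exact le_rfl

-- ===== VERDICT (by name: the statement is the Claim_ definition above) =====
theorem solution_spec : Claim_equal_solution := by
  intro name _ _
  unfold Spec_solution solution solution_alt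
  rw [loop_eq]
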